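-- pv_equiv track=rewrite | github.com/prasannavl/nix | scripts/archive/cloudflare-export.py | split_keyed_zone_resources_by_group
-- ===== SOURCE A (Python) =====
-- ZONE_GROUPS = ("main", "stage", "archive", "inactive")
--
-- def split_keyed_zone_resources_by_group(resources, zone_groups):
--     grouped = {group: {} for group in ZONE_GROUPS}
--     ungrouped = {}
--     for key, value in resources.items():
--         group = zone_groups.get(value.get("zone_name"))
--         if group in grouped:
--             grouped[group][key] = value
--         else:
--             ungrouped[key] = value
--     return grouped, ungrouped
-- ===== SOURCE B (Python) =====
-- ZONE_GROUPS = ("main", "stage", "archive", "inactive")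
--
-- def split_keyed_zone_resources_by_group(resources, zone_groups):
--     def resolve(value):
--         return zone_groups.get(value.get("zone_name"))
--     grouped = {g: {k: v for k, v in resources.items() if resolve(v) == g}
--                for g in ZONE_GROUPS}
--     ungrouped = {k: v for k, v in resources.items()
--                  if resolve(v) not in ZONE_GROUPS}
--     return grouped, ungrouped
-- ===== Notes on version B (the rewrite author's own statement) =====
-- stated objective: alternative
-- what changed: Replaced the single-pass loop that partitions items into mutable buckets by per-group dict comprehensions (one scan of the resources per zone group, plus one scan for the ungrouped remainder), declaratively filtering instead of dispatching.
import Mathlib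
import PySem

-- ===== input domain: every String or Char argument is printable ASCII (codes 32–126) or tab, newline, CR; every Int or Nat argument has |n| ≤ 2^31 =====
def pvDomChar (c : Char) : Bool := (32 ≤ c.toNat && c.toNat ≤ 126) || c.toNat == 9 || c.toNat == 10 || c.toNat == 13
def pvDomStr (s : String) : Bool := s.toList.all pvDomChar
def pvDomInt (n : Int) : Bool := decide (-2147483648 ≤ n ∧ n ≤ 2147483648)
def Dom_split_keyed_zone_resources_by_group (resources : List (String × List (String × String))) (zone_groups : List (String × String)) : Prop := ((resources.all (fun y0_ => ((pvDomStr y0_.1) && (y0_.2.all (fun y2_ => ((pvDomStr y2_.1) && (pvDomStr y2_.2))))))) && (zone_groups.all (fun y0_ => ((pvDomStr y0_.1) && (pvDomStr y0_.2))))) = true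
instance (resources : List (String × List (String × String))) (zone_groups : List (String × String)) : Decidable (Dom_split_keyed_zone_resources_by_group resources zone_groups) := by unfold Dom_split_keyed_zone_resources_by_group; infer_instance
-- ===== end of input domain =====

-- B groups by per-group filtering comprehensions instead of A's single partitioning loop; objective: alternative decomposition.
-- Both dicts are ports' return values only; neither program mutates its arguments.

-- ===== PORT A =====
def ZONE_GROUPS : List String := ["main", "stage", "archive", "inactive"]

-- group = zone_groups.get(value.get("zone_name"))
def pvGroupOf (zone_groups : List (String × String)) (value : List (String × String)) : Option String :=
  ((PySem.Dict.mk value).get? "zone_name").bind (fun zn => (PySem.Dict.mk zone_groups).get? zn)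

def split_keyed_zone_resources_by_group (resources : List (String × List (String × String))) (zone_groups : List (String × String)) : (List (String × List (String × List (String × String)))) × (List (String × List (String × String))) :=
  let grouped0 : PySem.Dict String (PySem.Dict String (List (String × String))) :=
    ZONE_GROUPS.foldl (fun d g => d.insert g PySem.Dict.empty) PySem.Dict.empty
  let st :=
    resources.foldl
      (fun (st : PySem.Dict String (PySem.Dict String (List (String × String))) × PySem.Dict String (List (String × String))) kv =>
        match pvGroupOf zone_groups kv.2 with
        | some g =>
          if st.1.contains g then
            (st.1.modify g PySem.Dict.empty (fun inner => inner.insert kv.1 kv.2), st.2)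
          else
            (st.1, st.2.insert kv.1 kv.2)
        | none => (st.1, st.2.insert kv.1 kv.2))
      (grouped0, PySem.Dict.empty)
  (st.1.items.map (fun p => (p.1, p.2.items)), st.2.items)

-- ===== PORT B =====
def split_keyed_zone_resources_by_group_alt (resources : List (String × List (String × String))) (zone_groups : List (String × String)) : (List (String × List (String × List (String × String)))) × (List (String × List (String × String))) :=
  (ZONE_GROUPS.map (fun g =>
      (g, resources.filter (fun kv => pvGroupOf zone_groups kv.2 == some g))),
   resources.filter (fun kv =>
      match pvGroupOf zone_groups kv.2 with
      | some g => !(ZONE_GROUPS.contains g)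
      | none => true))

-- ===== PRECONDITION & SPEC =====
-- Pre_ requires the resource keys to be distinct: `resources` ports a Python dict, whose keys are
-- necessarily distinct, so this excludes no input the Python A ever receives.
def Pre_split_keyed_zone_resources_by_group (resources : List (String × List (String × String))) (zone_groups : List (String × String)) : Prop :=
  (resources.map Prod.fst).Nodup
instance (resources : List (String × List (String × String))) (zone_groups : List (String × String)) : Decidable (Pre_split_keyed_zone_resources_by_group resources zone_groups) := by unfold Pre_split_keyed_zone_resources_by_group; infer_instance

def pvWitness_split_keyed_zone_resources_by_group : (List (String × List (String × String))) × (List (String × String)) :=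
  ([("r1", [("zone_name", "z1")]), ("r2", [("zone_name", "z2")])], [("z1", "main"), ("z2", "nope")])

-- DecidableEq for the (deeply nested) output type; assembled by hand because instance search
-- exceeds its default term-size limit at this nesting depth.
def pvDecEqInner : DecidableEq (List (String × List (String × String))) := inferInstance
def pvDecEqGrpItem : DecidableEq (String × List (String × List (String × String))) :=
  fun a b => @instDecidableEqProd _ _ inferInstance pvDecEqInner a b
def pvDecEqGrp : DecidableEq (List (String × List (String × List (String × String)))) :=
  fun a b => @instDecidableEqList _ pvDecEqGrpItem a b
def pvDecEqOut : DecidableEq ((List (String × List (String × List (String × String)))) × (List (String × List (String × String)))) :=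
  fun a b => @instDecidableEqProd _ _ pvDecEqGrp pvDecEqInner a b

def Spec_split_keyed_zone_resources_by_group (resources : List (String × List (String × String))) (zone_groups : List (String × String)) (out : (List (String × List (String × List (String × String)))) × (List (String × List (String × String)))) : Prop := out = split_keyed_zone_resources_by_group_alt resources zone_groups
instance (resources : List (String × List (String × String))) (zone_groups : List (String × String)) (out : (List (String × List (String × List (String × String)))) × (List (String × List (String × String)))) : Decidable (Spec_split_keyed_zone_resources_by_group resources zone_groups out) := by unfold Spec_split_keyed_zone_resources_by_group; exact pvDecEqOut out _

-- ===== CLAIM (what is proved, stated in full; the proofs are below) =====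
def Claim_equal_split_keyed_zone_resources_by_group : Prop := ∀ (resources : List (String × List (String × String))) (zone_groups : List (String × String)), Dom_split_keyed_zone_resources_by_group resources zone_groups → Pre_split_keyed_zone_resources_by_group resources zone_groups → Spec_split_keyed_zone_resources_by_group resources zone_groups (split_keyed_zone_resources_by_group resources zone_groups)

-- ===== LEMMAS AND PROOFS =====

-- The loop invariant: running A's loop over `l` from a grouped dict with exactly the four
-- zone-group buckets (inner dicts d1..d4) and an ungrouped dict u, where every key of `l`
-- is fresh for all five dicts and the keys of `l` are distinct, appends each item of `l`
-- to the bucket B's filters select.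
theorem pvLoop
    (zone_groups : List (String × String))
    (l : List (String × List (String × String)))
    (d1 d2 d3 d4 : PySem.Dict String (List (String × String)))
    (u : PySem.Dict String (List (String × String)))
    (hfresh : ∀ kv ∈ l, d1.contains kv.1 = false ∧ d2.contains kv.1 = false ∧
        d3.contains kv.1 = false ∧ d4.contains kv.1 = false ∧ u.contains kv.1 = false)
    (hnd : (l.map Prod.fst).Nodup) :
    l.foldl
      (fun (st : PySem.Dict String (PySem.Dict String (List (String × String))) × PySem.Dict String (List (String × String))) kv =>
        match pvGroupOf zone_groups kv.2 with
        | some g =>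
          if st.1.contains g then
            (st.1.modify g PySem.Dict.empty (fun inner => inner.insert kv.1 kv.2), st.2)
          else
            (st.1, st.2.insert kv.1 kv.2)
        | none => (st.1, st.2.insert kv.1 kv.2))
      (PySem.Dict.mk [("main", d1), ("stage", d2), ("archive", d3), ("inactive", d4)], u)
    = (PySem.Dict.mk [
        ("main", PySem.Dict.mk (d1.items ++ l.filter (fun kv => pvGroupOf zone_groups kv.2 == some "main"))),
        ("stage", PySem.Dict.mk (d2.items ++ l.filter (fun kv => pvGroupOf zone_groups kv.2 == some "stage"))),
        ("archive", PySem.Dict.mk (d3.items ++ l.filter (fun kv => pvGroupOf zone_groups kv.2 == some "archive"))),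
        ("inactive", PySem.Dict.mk (d4.items ++ l.filter (fun kv => pvGroupOf zone_groups kv.2 == some "inactive")))],
       PySem.Dict.mk (u.items ++ l.filter (fun kv =>
        match pvGroupOf zone_groups kv.2 with
        | some g => !(ZONE_GROUPS.contains g)
        | none => true))) := by
  induction l generalizing d1 d2 d3 d4 u with
  | nil => simp
  | cons kv rest ih =>
    obtain ⟨h1, h2, h3, h4, hu⟩ := hfresh kv (List.mem_cons_self)
    simp only [List.map_cons, List.nodup_cons] at hnd
    have hne : ∀ p ∈ rest, p.1 ≠ kv.1 := by
      intro p hp h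
      exact hnd.1 (h ▸ List.mem_map_of_mem hp)
    have htail : ∀ p ∈ rest, d1.contains p.1 = false ∧ d2.contains p.1 = false ∧
        d3.contains p.1 = false ∧ d4.contains p.1 = false ∧ u.contains p.1 = false :=
      fun p hp => hfresh p (List.mem_cons_of_mem _ hp)
    simp only [List.foldl_cons]
    cases hg : pvGroupOf zone_groups kv.2 with
    | none =>
      refine Eq.trans (ih d1 d2 d3 d4 (u.insert kv.1 kv.2)
        (fun p hp => ⟨(htail p hp).1, (htail p hp).2.1, (htail p hp).2.2.1, (htail p hp).2.2.2.1,
          by rw [PySem.Dict.contains_insert]; simp [hne p hp, (htail p hp).2.2.2.2]⟩)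
        hnd.2) ?_
      rw [PySem.Dict.items_insert_of_not_contains u kv.2 hu]
      simp [hg]
    | some g =>
      by_cases hm : g = "main"
      · subst hm
        refine Eq.trans (ih (d1.insert kv.1 kv.2) d2 d3 d4 u
          (fun p hp => ⟨by rw [PySem.Dict.contains_insert]; simp [hne p hp, (htail p hp).1],
            (htail p hp).2.1, (htail p hp).2.2.1, (htail p hp).2.2.2.1, (htail p hp).2.2.2.2⟩)
          hnd.2) ?_
        rw [PySem.Dict.items_insert_of_not_contains d1 kv.2 h1]
        simp [hg, ZONE_GROUPS]
      by_cases hs : g = "stage"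
      · subst hs
        refine Eq.trans (ih d1 (d2.insert kv.1 kv.2) d3 d4 u
          (fun p hp => ⟨(htail p hp).1,
            by rw [PySem.Dict.contains_insert]; simp [hne p hp, (htail p hp).2.1],
            (htail p hp).2.2.1, (htail p hp).2.2.2.1, (htail p hp).2.2.2.2⟩)
          hnd.2) ?_
        rw [PySem.Dict.items_insert_of_not_contains d2 kv.2 h2]
        simp [hg, ZONE_GROUPS]
      by_cases ha : g = "archive"
      · subst ha
        refine Eq.trans (ih d1 d2 (d3.insert kv.1 kv.2) d4 u
          (fun p hp => ⟨(htail p hp).1, (htail p hp).2.1,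
            by rw [PySem.Dict.contains_insert]; simp [hne p hp, (htail p hp).2.2.1],
            (htail p hp).2.2.2.1, (htail p hp).2.2.2.2⟩)
          hnd.2) ?_
        rw [PySem.Dict.items_insert_of_not_contains d3 kv.2 h3]
        simp [hg, ZONE_GROUPS]
      by_cases hi : g = "inactive"
      · subst hi
        refine Eq.trans (ih d1 d2 d3 (d4.insert kv.1 kv.2) u
          (fun p hp => ⟨(htail p hp).1, (htail p hp).2.1, (htail p hp).2.2.1,
            by rw [PySem.Dict.contains_insert]; simp [hne p hp, (htail p hp).2.2.2.1],
            (htail p hp).2.2.2.2⟩)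
          hnd.2) ?_
        rw [PySem.Dict.items_insert_of_not_contains d4 kv.2 h4]
        simp [hg, ZONE_GROUPS]
      -- g is none of the four groups: the item goes to ungrouped
      · have hcon : (PySem.Dict.mk [("main", d1), ("stage", d2), ("archive", d3), ("inactive", d4)]).contains g = false := by
          simp [PySem.Dict.contains_mk,
            (Ne.symm hm : "main" ≠ g), (Ne.symm hs : "stage" ≠ g),
            (Ne.symm ha : "archive" ≠ g), (Ne.symm hi : "inactive" ≠ g)]
        simp only [hcon, Bool.false_eq_true, if_false]
        refine Eq.trans (ih d1 d2 d3 d4 (u.insert kv.1 kv.2)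
          (fun p hp => ⟨(htail p hp).1, (htail p hp).2.1, (htail p hp).2.2.1, (htail p hp).2.2.2.1,
            by rw [PySem.Dict.contains_insert]; simp [hne p hp, (htail p hp).2.2.2.2]⟩)
          hnd.2) ?_
        rw [PySem.Dict.items_insert_of_not_contains u kv.2 hu]
        simp [hg, ZONE_GROUPS, hm, hs, ha, hi]

-- ===== VERDICT (by name: the statement is the Claim_ definition above) =====
theorem split_keyed_zone_resources_by_group_spec : Claim_equal_split_keyed_zone_resources_by_group := by
  intro resources zone_groups _hdom hpre
  unfold Spec_split_keyed_zone_resources_by_group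
  unfold split_keyed_zone_resources_by_group split_keyed_zone_resources_by_group_alt
  simp only []
  have h0 : (ZONE_GROUPS.foldl (fun d g => d.insert g PySem.Dict.empty) PySem.Dict.empty :
      PySem.Dict String (PySem.Dict String (List (String × String)))) =
      PySem.Dict.mk [("main", PySem.Dict.empty), ("stage", PySem.Dict.empty),
        ("archive", PySem.Dict.empty), ("inactive", PySem.Dict.empty)] := rfl
  rw [h0, pvLoop zone_groups resources _ _ _ _ _
    (fun p _ => ⟨by simp, by simp, by simp, by simp, by simp⟩) hpre]
  simp [ZONE_GROUPS, PySem.Dict.empty]
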